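-- pv_equiv track=rewrite | github.com/kim-taewoo/TIL_PUBLIC | Algorithm/programmers/2019kakaoBlind/무지의먹방라이브.py | solution
-- ===== SOURCE A (Python) =====
-- def solution(food_times, k):
--     idx = 0
--     while k:
--         if idx >= len(food_times):
--             idx = idx % len(food_times)
--         if food_times[idx] != 0:
--             food_times[idx] -= 1
--             k -= 1
--         idx += 1
--
--     cnt = 0
--     while cnt <= len(food_times):
--         if idx >= len(food_times):
--             idx = idx % len(food_times)
--         if food_times[idx]:
--             return idx+1
--         idx += 1
--         cnt += 1
--
--     return -1
-- ===== SOURCE B (Python) =====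
-- def solution(food_times, k):
--     fs = list(food_times)
--     while True:
--         m = sum(1 for v in fs if v != 0)
--         if m == 0:
--             return -1
--         if k < m:
--             rem = [i for i, v in enumerate(fs) if v != 0]
--             return rem[k] + 1
--         pos = [v for v in fs if v > 0]
--         q = min(min(pos), k // m) if pos else k // m
--         fs = [v if v == 0 else v - q for v in fs]
--         k -= q * m
-- ===== Notes on version B (the rewrite author's own statement) =====
-- stated objective: alternative
-- what changed: A simulates the eating second by second in a round-robin loop; B jumps whole blocks of full rounds at once (the block size bounded by the smallest remaining positive time and k//m), so each pass either finishes or permanently removes the smallest remaining dishes.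
import Mathlib
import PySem

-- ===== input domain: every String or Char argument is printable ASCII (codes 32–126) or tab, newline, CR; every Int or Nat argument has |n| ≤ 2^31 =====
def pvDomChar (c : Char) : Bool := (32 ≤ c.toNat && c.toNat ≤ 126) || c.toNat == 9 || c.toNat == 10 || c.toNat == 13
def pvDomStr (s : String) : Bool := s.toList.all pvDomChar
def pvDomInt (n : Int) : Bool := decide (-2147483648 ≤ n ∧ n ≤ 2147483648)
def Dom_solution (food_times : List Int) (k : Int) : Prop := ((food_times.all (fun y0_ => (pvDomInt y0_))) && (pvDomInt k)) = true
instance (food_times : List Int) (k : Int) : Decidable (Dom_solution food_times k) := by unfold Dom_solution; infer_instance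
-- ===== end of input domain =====

-- B replaces A's one-second-at-a-time round-robin simulation by a loop that jumps whole blocks of
-- full rounds at once (block size bounded by the smallest remaining positive time and k // m).
-- The equivalence proved is about the RETURN value only: Python A mutates food_times in place, B does not.

-- ===== PORT A =====
-- First while loop of A. Python's idx is an int that stays ≥ 0 (starts at 0, only incremented or
-- reduced mod len), so it is carried as a Nat; `%` on Nat agrees with Python's `%` for these values.
-- The fuel only makes the loop total: `none` = the Python loop has not finished (it diverges, or
-- raises ZeroDivisionError/IndexError on an empty list — both outside Pre_solution).
def pyLoop1 : Nat → List Int → Int → Nat → Option (List Int × Nat)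
  | 0, _, _, _ => none
  | fuel+1, fs, k, idx =>
    if k = 0 then some (fs, idx)
    else
      let i := if fs.length ≤ idx then idx % fs.length else idx
      match fs[i]? with
      | none => none      -- only reachable for fs = [], where Python raises (outside Pre_solution)
      | some v =>
        if v ≠ 0 then pyLoop1 fuel (fs.set i (v - 1)) (k - 1) (i + 1)
        else pyLoop1 fuel fs k (i + 1)

-- Second while loop of A: at most len+1 probes (cnt from 0 while cnt ≤ len), carried as a countdown.
def pyLoop2 : List Int → Nat → Nat → Int
  | _, _, 0 => -1
  | fs, idx, cnt+1 =>
    let i := if fs.length ≤ idx then idx % fs.length else idx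
    match fs[i]? with
    | none => -1          -- only reachable for fs = [], where Python raises (outside Pre_solution)
    | some v => if v ≠ 0 then (i : Int) + 1 else pyLoop2 fs (i + 1) cnt

def solution (food_times : List Int) (k : Int) : Int :=
  match pyLoop1 ((k.toNat + 1) * (food_times.length + 2)) food_times k 0 with
  | none => 0             -- fuel exhausted: the Python loop never ends here (outside Pre_solution)
  | some (fs, idx) => pyLoop2 fs idx (fs.length + 1)

-- ===== PORT B =====
-- m = sum(1 for v in fs if v != 0)
def bCount (fs : List Int) : Nat := (fs.filter (fun v => v != 0)).length
-- rem = [i for i, v in enumerate(fs) if v != 0]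
def bRem (fs : List Int) : List Int :=
  ((PySem.List.enumerate fs 0).filter (fun p => p.2 != 0)).map (fun p => p.1)
-- fs = [v if v == 0 else v - q for v in fs]
def bJump (fs : List Int) (q : Int) : List Int :=
  fs.map (fun v => if v == 0 then v else v - q)

-- q = min(min(pos), k // m) if pos else k // m   (pos = [v for v in fs if v > 0])
def bQ (fs : List Int) (k m : Int) : Int :=
  match PySem.List.min? (fs.filter (fun v => decide (0 < v))) (fun x => x) with
  | none => PySem.Int.floordiv k m
  | some t => min t (PySem.Int.floordiv k m)

def bRun : Nat → List Int → Int → Int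
  | 0, _, _ => -1     -- fuel exhausted: unreachable, each pass below consumes ≥ 1 of k (lemma bRun_fuel)
  | fuel+1, fs, k =>
    if (bCount fs : Int) = 0 then -1
    else if k < (bCount fs : Int) then ((PySem.List.pyGet? (bRem fs) k).getD 0) + 1
    else bRun fuel (bJump fs (bQ fs k (bCount fs : Int))) (k - bQ fs k (bCount fs : Int) * (bCount fs : Int))

def solution_alt (food_times : List Int) (k : Int) : Int := bRun (k.toNat + 1) food_times k

-- ===== PRECONDITION & SPEC =====
-- Pre_solution is exactly where Python A returns: on [] it raises ZeroDivisionError, for k < 0 the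
-- first loop never reaches 0, and when every time is ≥ 0 but k exceeds their sum the food runs out
-- and the loop spins forever (a negative entry is decremented forever, i.e. never runs out).
def Pre_solution (food_times : List Int) (k : Int) : Prop :=
  food_times ≠ [] ∧ 0 ≤ k ∧ ((∀ x ∈ food_times, 0 ≤ x) → k ≤ food_times.sum)
instance (food_times : List Int) (k : Int) : Decidable (Pre_solution food_times k) := by
  unfold Pre_solution; infer_instance
def pvWitness_solution : List Int × Int := ([3, 1, 2], 5)

def Spec_solution (food_times : List Int) (k : Int) (out : Int) : Prop := out = solution_alt food_times k
instance (food_times : List Int) (k : Int) (out : Int) : Decidable (Spec_solution food_times k out) := by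
  unfold Spec_solution; infer_instance

-- ===== CLAIM (what is proved, stated in full; the proofs are below) =====
def Claim_equal_solution : Prop := ∀ (food_times : List Int) (k : Int), Dom_solution food_times k → Pre_solution food_times k → Spec_solution food_times k (solution food_times k)
-- ===== LEMMAS AND PROOFS =====
-- ---------- generic helpers about the ported loops ----------

def dec1 (v : Int) : Int := if v = 0 then v else v - 1

-- number of nonzero entries at positions ≥ i
def nzCnt (fs : List Int) (i : Nat) : Nat := ((fs.drop i).filter (fun v => v != 0)).length

-- position of the k-th (1-indexed) nonzero entry at position ≥ i
def kth (fs : List Int) (i k : Nat) : Option Nat :=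
  if h : i < fs.length then
    if fs[i] ≠ 0 then
      if k ≤ 1 then some i else kth fs (i + 1) (k - 1)
    else kth fs (i + 1) k
  else none
termination_by fs.length - i

lemma bCount_eq_nzCnt (fs : List Int) : bCount fs = nzCnt fs 0 := by
  simp [bCount, nzCnt]

lemma nzCnt_oob (fs : List Int) (i : Nat) (h : fs.length ≤ i) : nzCnt fs i = 0 := by
  simp [nzCnt, List.drop_eq_nil_of_le h]

lemma nzCnt_succ (fs : List Int) (i : Nat) (h : i < fs.length) :
    nzCnt fs i = (if fs[i] = 0 then 0 else 1) + nzCnt fs (i + 1) := by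
  unfold nzCnt
  rw [List.drop_eq_getElem_cons h, List.filter_cons]
  by_cases h0 : fs[i] = 0
  · simp [h0]
  · simp [h0]; omega

lemma nzCnt_set_succ (fs : List Int) (i : Nat) (x : Int) :
    nzCnt (fs.set i x) (i + 1) = nzCnt fs (i + 1) := by
  unfold nzCnt
  rw [List.drop_set]
  simp

lemma nzCnt_zero_tail (fs : List Int) (j : Nat) (h : nzCnt fs j = 0) :
    ∀ p, j ≤ p → fs.getD p 0 = 0 := by
  intro p hp
  by_cases hlt : p < fs.length
  · have hmem : fs[p] ∈ fs.drop j := by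
      rw [List.mem_iff_getElem]
      refine ⟨p - j, by rw [List.length_drop]; omega, ?_⟩
      rw [List.getElem_drop]
      congr 1; omega
    by_contra hne
    have hz : fs.getD p 0 = fs[p] := by
      rw [List.getD_eq_getElem?_getD, List.getElem?_eq_getElem hlt]; rfl
    have : fs[p] ∈ (fs.drop j).filter (fun v => v != 0) := by
      rw [List.mem_filter]
      refine ⟨hmem, by simpa using fun hc => hne (by rw [hz, hc])⟩
    rw [nzCnt, List.length_eq_zero_iff] at h
    simp [h] at this
  · rw [List.getD_eq_getElem?_getD, List.getElem?_eq_none (by omega)]; rfl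

lemma kth_sound (fs : List Int) (i k J : Nat) (h : kth fs i k = some J) :
    i ≤ J ∧ J < fs.length ∧ fs.getD J 0 ≠ 0 := by
  induction hd : fs.length - i using Nat.strong_induction_on generalizing i k with
  | _ d ih =>
    rw [kth] at h
    by_cases hi : i < fs.length
    · simp only [dif_pos hi] at h
      by_cases h0 : fs[i] = 0
      · simp only [h0, ne_eq, not_true_eq_false, if_false] at h
        obtain ⟨h1, h2, h3⟩ := ih (fs.length - (i+1)) (by omega) (i+1) k h rfl
        exact ⟨by omega, h2, h3⟩
      · simp only [h0, ne_eq, not_false_eq_true, if_true] at h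
        by_cases hk : k ≤ 1
        · simp only [if_pos hk, Option.some.injEq] at h
          subst h
          refine ⟨le_refl _, hi, ?_⟩
          rw [List.getD_eq_getElem?_getD, List.getElem?_eq_getElem hi]
          simpa using h0
        · simp only [if_neg hk] at h
          obtain ⟨h1, h2, h3⟩ := ih (fs.length - (i+1)) (by omega) (i+1) (k-1) h rfl
          exact ⟨by omega, h2, h3⟩
    · rw [dif_neg hi] at h; cases h

lemma kth_isSome (fs : List Int) (i k : Nat) (h1 : 1 ≤ k) (h2 : k ≤ nzCnt fs i) :
    ∃ J, kth fs i k = some J := by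
  induction hd : fs.length - i using Nat.strong_induction_on generalizing i k with
  | _ d ih =>
    rw [kth]
    by_cases hi : i < fs.length
    · rw [dif_pos hi]
      by_cases h0 : fs[i] = 0
      · simp only [h0, ne_eq, not_true_eq_false, if_false]
        exact ih (fs.length - (i+1)) (by omega) (i+1) k h1
          (by rw [nzCnt_succ fs i hi, if_pos h0] at h2; omega) rfl
      · simp only [h0, ne_eq, not_false_eq_true, if_true]
        by_cases hk : k ≤ 1
        · rw [if_pos hk]; exact ⟨i, rfl⟩
        · rw [if_neg hk]
          exact ih (fs.length - (i+1)) (by omega) (i+1) (k-1) (by omega)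
            (by rw [nzCnt_succ fs i hi, if_neg h0] at h2; omega) rfl
    · rw [nzCnt_oob fs i (by omega)] at h2; omega

lemma kth_succ (fs : List Int) (i k J : Nat) (h1 : 1 ≤ k) (h : kth fs i k = some J) :
    kth fs i (k + 1) = kth fs (J + 1) 1 := by
  induction hd : fs.length - i using Nat.strong_induction_on generalizing i k with
  | _ d ih =>
    rw [kth] at h
    by_cases hi : i < fs.length
    · rw [dif_pos hi] at h
      by_cases h0 : fs[i] = 0
      · simp only [h0, ne_eq, not_true_eq_false, if_false] at h
        rw [kth, dif_pos hi]
        simp only [h0, ne_eq, not_true_eq_false, if_false]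
        exact ih (fs.length - (i+1)) (by omega) (i+1) k h1 h rfl
      · simp only [h0, ne_eq, not_false_eq_true, if_true] at h
        by_cases hk : k ≤ 1
        · rw [if_pos hk, Option.some.injEq] at h
          subst h
          rw [kth, dif_pos hi]
          simp only [h0, ne_eq, not_false_eq_true, if_true, if_neg (by omega : ¬ k + 1 ≤ 1)]
          congr 1
          omega
        · rw [if_neg hk] at h
          rw [kth, dif_pos hi]
          simp only [h0, ne_eq, not_false_eq_true, if_true, if_neg (by omega : ¬ k + 1 ≤ 1)]
          have := ih (fs.length - (i+1)) (by omega) (i+1) (k-1) (by omega) h rfl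
          rw [show k + 1 - 1 = (k-1) + 1 by omega, this]
    · rw [dif_neg hi] at h; cases h

lemma kth_one_zeros (fs : List Int) (i P : Nat) (h : kth fs i 1 = some P) :
    ∀ p, i ≤ p → p < P → fs.getD p 0 = 0 := by
  induction hd : fs.length - i using Nat.strong_induction_on generalizing i with
  | _ d ih =>
    rw [kth] at h
    by_cases hi : i < fs.length
    · rw [dif_pos hi] at h
      by_cases h0 : fs[i] = 0
      · simp only [h0, ne_eq, not_true_eq_false, if_false] at h
        intro p hp1 hp2
        by_cases hpi : p = i
        · subst hpi
          rw [List.getD_eq_getElem?_getD, List.getElem?_eq_getElem hi]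
          simpa using h0
        · exact ih (fs.length - (i+1)) (by omega) (i+1) h rfl p (by omega) hp2
      · simp only [h0, ne_eq, not_false_eq_true, if_true, if_pos (le_refl 1),
          Option.some.injEq] at h
        subst h
        intro p hp1 hp2
        omega
    · rw [dif_neg hi] at h; cases h

lemma kth_count (fs : List Int) (i k J : Nat) (h1 : 1 ≤ k) (h : kth fs i k = some J) :
    nzCnt fs (J + 1) + k = nzCnt fs i := by
  induction hd : fs.length - i using Nat.strong_induction_on generalizing i k with
  | _ d ih =>
    rw [kth] at h
    by_cases hi : i < fs.length
    · rw [dif_pos hi] at h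
      by_cases h0 : fs[i] = 0
      · simp only [h0, ne_eq, not_true_eq_false, if_false] at h
        have := ih (fs.length - (i+1)) (by omega) (i+1) k h1 h rfl
        rw [nzCnt_succ fs i hi, if_pos h0]
        omega
      · simp only [h0, ne_eq, not_false_eq_true, if_true] at h
        by_cases hk : k ≤ 1
        · rw [if_pos hk, Option.some.injEq] at h
          subst h
          rw [nzCnt_succ fs i hi, if_neg h0]
          omega
        · rw [if_neg hk] at h
          have := ih (fs.length - (i+1)) (by omega) (i+1) (k-1) (by omega) h rfl
          rw [nzCnt_succ fs i hi, if_neg h0]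
          omega
    · rw [dif_neg hi] at h; cases h

lemma kth_set_lt (fs : List Int) (p i k : Nat) (x : Int) (h : p < i) :
    kth (fs.set p x) i k = kth fs i k := by
  induction hd : fs.length - i using Nat.strong_induction_on generalizing i k with
  | _ d ih =>
    conv_lhs => rw [kth]
    conv_rhs => rw [kth]
    simp only [List.length_set]
    by_cases hi : i < fs.length
    · rw [dif_pos hi, dif_pos hi, List.getElem_set_ne (by omega)]
      by_cases h0 : fs[i] = 0
      · simp only [h0, ne_eq, not_true_eq_false, if_false]
        exact ih (fs.length - (i+1)) (by omega) (i+1) k (by omega) rfl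
      · simp only [h0, ne_eq, not_false_eq_true, if_true]
        by_cases hk : k ≤ 1
        · rw [if_pos hk, if_pos hk]
        · rw [if_neg hk, if_neg hk]
          exact ih (fs.length - (i+1)) (by omega) (i+1) (k-1) (by omega) rfl
    · rw [dif_neg hi, dif_neg hi]

lemma kth_shift (v : Int) (t : List Int) (i k : Nat) :
    kth (v :: t) (i + 1) k = (kth t i k).map (· + 1) := by
  induction hd : t.length - i using Nat.strong_induction_on generalizing i k with
  | _ d ih =>
    conv_lhs => rw [kth]
    conv_rhs => rw [kth]
    by_cases hi : i < t.length
    · rw [dif_pos (by simpa using Nat.succ_lt_succ hi), dif_pos hi]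
      have hg : (v :: t)[i + 1]'(by simpa using Nat.succ_lt_succ hi) = t[i] := List.getElem_cons_succ ..
      rw [hg]
      by_cases h0 : t[i] = 0
      · simp only [h0, ne_eq, not_true_eq_false, if_false]
        exact ih (t.length - (i+1)) (by omega) (i+1) k rfl
      · simp only [h0, ne_eq, not_false_eq_true, if_true]
        by_cases hk : k ≤ 1
        · rw [if_pos hk, if_pos hk]; rfl
        · rw [if_neg hk, if_neg hk]
          exact ih (t.length - (i+1)) (by omega) (i+1) (k-1) rfl
    · rw [dif_neg (by simp; omega), dif_neg hi]; rfl

lemma bRem_aux (fs : List Int) : ∀ (st : Int) (j : Nat),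
    (((PySem.List.enumerate fs st).filter (fun p => p.2 != 0)).map (fun p => p.1))[j]?
      = (kth fs 0 (j + 1)).map (fun J => (J : Int) + st) := by
  induction fs with
  | nil => intro st j; simp [PySem.List.enumerate_nil, kth]
  | cons v t ih =>
    intro st j
    rw [PySem.List.enumerate_cons, List.filter_cons]
    by_cases h0 : v = 0
    · simp only [h0]
      rw [if_neg (by simp)]
      rw [ih (st + 1) j]
      conv_rhs => rw [kth]
      rw [dif_pos (by simp)]
      simp only [List.getElem_cons_zero, ne_eq, not_true_eq_false, if_false]
      rw [kth_shift]
      cases kth t 0 (j + 1) with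
      | none => simp
      | some J => simp; ring
    · rw [if_pos (by simpa using h0)]
      rw [List.map_cons]
      cases j with
      | zero =>
        conv_rhs => rw [kth]
        rw [dif_pos (by simp)]
        simp only [List.getElem_cons_zero, h0, ne_eq, not_false_eq_true, if_true,
          if_pos (le_refl 1)]
        simp
      | succ j =>
        rw [List.getElem?_cons_succ, ih (st + 1) j]
        conv_rhs => rw [kth]
        rw [dif_pos (by simp)]
        simp only [List.getElem_cons_zero, h0, ne_eq, not_false_eq_true, if_true,
          if_neg (by omega : ¬ j + 1 + 1 ≤ 1)]
        rw [show j + 1 + 1 - 1 = j + 1 by omega, kth_shift]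
        cases kth t 0 (j + 1) with
        | none => simp
        | some J => simp; ring

lemma bRem_get (fs : List Int) (j : Nat) :
    (bRem fs)[j]? = (kth fs 0 (j + 1)).map (fun J => (J : Int)) := by
  rw [bRem, bRem_aux fs 0 j]
  cases kth fs 0 (j + 1) with
  | none => simp
  | some J => simp

-- ---------- pyLoop1 ----------

lemma pyLoop1_done (f : Nat) (fs : List Int) (i : Nat) : pyLoop1 (f + 1) fs 0 i = some (fs, i) := by
  simp [pyLoop1]

lemma pyLoop1_step (f : Nat) (fs : List Int) (k : Int) (i : Nat) (hk : k ≠ 0) (hi : i < fs.length) :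
    pyLoop1 (f + 1) fs k i =
      if fs[i] ≠ 0 then pyLoop1 f (fs.set i (fs[i] - 1)) (k - 1) (i + 1)
      else pyLoop1 f fs k (i + 1) := by
  rw [pyLoop1, if_neg hk]
  simp only [if_neg (Nat.not_le.mpr hi)]
  rw [List.getElem?_eq_getElem hi]

lemma pyLoop1_wrap (f : Nat) (fs : List Int) (k : Int) (hk : k ≠ 0) :
    pyLoop1 f fs k fs.length = pyLoop1 f fs k 0 := by
  cases f with
  | zero => rfl
  | succ f =>
    conv_lhs => rw [pyLoop1]
    conv_rhs => rw [pyLoop1]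
    rw [if_neg hk, if_neg hk]
    simp only [le_refl, if_true, Nat.mod_self]
    by_cases h0 : fs.length = 0
    · simp [h0]
    · rw [if_neg (by omega)]

lemma pyLoop1_length (f : Nat) (fs : List Int) (k : Int) (i : Nat) (F : List Int) (I : Nat)
    (h : pyLoop1 f fs k i = some (F, I)) : F.length = fs.length := by
  induction f generalizing fs k i with
  | zero => simp [pyLoop1] at h
  | succ f ih =>
    rw [pyLoop1] at h
    by_cases hk : k = 0
    · rw [if_pos hk] at h
      cases h
      rfl
    · rw [if_neg hk] at h
      cases hg : fs[if fs.length ≤ i then i % fs.length else i]? with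
      | none => simp only [hg] at h; cases h
      | some v =>
        simp only [hg] at h
        by_cases h0 : v ≠ 0
        · rw [if_pos h0] at h
          have := ih _ _ _ h
          simpa using this
        · rw [if_neg h0] at h
          exact ih _ _ _ h

-- one pass over positions ≥ i when more than nzCnt fs i seconds remain:
-- every nonzero entry gets decremented and the scan reaches the end of the list
lemma seg_a (d : Nat) : ∀ (i : Nat) (fs : List Int) (k : Int) (f : Nat),
    d = fs.length - i → i ≤ fs.length → (nzCnt fs i : Int) < k →
    pyLoop1 ((fs.length - i) + f) fs k i
      = pyLoop1 f (fs.take i ++ (fs.drop i).map dec1) (k - nzCnt fs i) fs.length := by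
  induction d using Nat.strong_induction_on with
  | _ d ih =>
    intro i fs k f hd hi hcnt
    by_cases hii : i < fs.length
    · have hk0 : k ≠ 0 := by have : (0:Int) ≤ (nzCnt fs i : Int) := by positivity
                             omega
      have hstep := pyLoop1_step ((fs.length - (i+1)) + f) fs k i hk0 hii
      rw [show fs.length - i + f = (fs.length - (i+1) + f) + 1 by omega, hstep]
      by_cases h0 : fs[i] = 0
      · rw [if_neg (by simpa using h0)]
        have hrec := ih (fs.length - (i+1)) (by omega) (i+1) fs k f rfl (by omega)
          (by rw [nzCnt_succ fs i hii, if_pos h0] at hcnt; simpa using hcnt)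
        rw [hrec, nzCnt_succ fs i hii, if_pos h0]
        have hlist : List.take (i+1) fs ++ List.map dec1 (List.drop (i+1) fs)
            = List.take i fs ++ List.map dec1 (List.drop i fs) := by
          conv_rhs => rw [List.drop_eq_getElem_cons hii]
          rw [List.take_add_one, List.getElem?_eq_getElem hii, List.map_cons]
          simp [dec1, h0]
        rw [hlist]
        norm_num
      · rw [if_pos (by simpa using h0)]
        have hlen : (fs.set i (fs[i] - 1)).length = fs.length := by simp
        have hcnt' : (nzCnt (fs.set i (fs[i] - 1)) (i+1) : Int) < k - 1 := by
          rw [nzCnt_set_succ]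
          rw [nzCnt_succ fs i hii, if_neg h0] at hcnt
          push_cast at hcnt ⊢
          omega
        have hrec := ih (fs.length - (i+1)) (by omega) (i+1) (fs.set i (fs[i] - 1)) (k-1) f
          (by rw [hlen]) (by rw [hlen]; omega) hcnt'
        rw [hlen] at hrec
        rw [hrec]
        rw [nzCnt_set_succ]
        have hl : (List.take i fs).length = i := by simp; omega
        have htake : List.take (i+1) (fs.set i (fs[i] - 1)) = List.take i fs ++ [fs[i] - 1] := by
          rw [List.set_eq_take_cons_drop _ hii, List.take_append]
          rw [List.take_of_length_le (by rw [hl]; omega), hl]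
          norm_num
        have hlist : List.take (i+1) (fs.set i (fs[i] - 1)) ++ List.map dec1 (List.drop (i+1) (fs.set i (fs[i] - 1)))
            = List.take i fs ++ List.map dec1 (List.drop i fs) := by
          rw [List.drop_set, if_pos (by omega), htake]
          conv_rhs => rw [List.drop_eq_getElem_cons hii]
          rw [List.map_cons]
          simp [dec1, h0]
        rw [hlist]
        have : k - 1 - (nzCnt fs (i+1) : Int) = k - (nzCnt fs i : Int) := by
          rw [nzCnt_succ fs i hii, if_neg h0]
          push_cast
          ring
        rw [this]
    · have : i = fs.length := by omega
      subst this
      rw [nzCnt_oob fs fs.length (le_refl _)]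
      simp [List.drop_eq_nil_of_le]

-- one pass over positions ≥ i when only kk ≤ nzCnt fs i seconds remain: the loop eats the first
-- kk nonzero entries (the last one at position J) and stops with idx = J + 1
lemma seg_b (d : Nat) : ∀ (i : Nat) (fs : List Int) (kk : Nat) (J : Nat) (f : Nat),
    d = fs.length - i → 1 ≤ kk → kth fs i kk = some J →
    ∃ F, pyLoop1 ((fs.length - i) + 1 + f) fs (kk : Int) i = some (F, J + 1) ∧
      ∀ p, F[p]? = if i ≤ p ∧ p ≤ J then (fs[p]?.map dec1) else fs[p]? := by
  induction d using Nat.strong_induction_on with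
  | _ d ih =>
    intro i fs kk J f hd hkk hkth
    have hsound := kth_sound fs i kk J hkth
    have hii : i < fs.length := by omega
    have hk0 : (kk : Int) ≠ 0 := by exact_mod_cast (by omega : kk ≠ 0)
    rw [show (fs.length - i) + 1 + f = ((fs.length - (i+1)) + 1 + f) + 1 by omega,
      pyLoop1_step _ fs _ i hk0 hii]
    rw [kth, dif_pos hii] at hkth
    by_cases h0 : fs[i] = 0
    · rw [if_neg (by simpa using h0)]
      simp only [h0, ne_eq, not_true_eq_false, if_false] at hkth
      obtain ⟨F, hF1, hF2⟩ := ih (fs.length - (i+1)) (by omega) (i+1) fs kk J f rfl hkk hkth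
      refine ⟨F, hF1, ?_⟩
      intro p
      have hiJ : i + 1 ≤ J := (kth_sound fs (i+1) kk J hkth).1
      rcases Nat.lt_trichotomy p i with hp | hp | hp
      · rw [hF2 p, if_neg (by omega), if_neg (by omega)]
      · subst hp
        rw [hF2 p, if_neg (by omega), if_pos (by omega)]
        rw [List.getElem?_eq_getElem hii]
        simp [dec1, h0]
      · rw [hF2 p]
        by_cases hpJ : p ≤ J
        · rw [if_pos (by omega), if_pos (by omega)]
        · rw [if_neg (by omega), if_neg (by omega)]
    · rw [if_pos (by simpa using h0)]
      simp only [h0, ne_eq, not_false_eq_true, if_true] at hkth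
      by_cases hk1 : kk ≤ 1
      · rw [if_pos hk1, Option.some.injEq] at hkth
        obtain rfl : i = J := hkth
        rw [show ((kk : Int) - 1) = 0 by omega,
          show (fs.length - (i+1)) + 1 + f = ((fs.length - (i+1)) + f) + 1 by omega]
        refine ⟨fs.set i (fs[i] - 1), pyLoop1_done _ _ _, ?_⟩
        intro p
        rw [List.getElem?_set]
        by_cases hp : i = p
        · subst hp
          rw [if_pos rfl, if_pos hii, if_pos (by omega : i ≤ i ∧ i ≤ i)]
          rw [List.getElem?_eq_getElem hii]
          simp [dec1, h0]
        · rw [if_neg hp, if_neg (by omega)]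
      · rw [if_neg hk1] at hkth
        have hiJ : i + 1 ≤ J := (kth_sound fs (i+1) (kk-1) J hkth).1
        have hkth' : kth (fs.set i (fs[i] - 1)) (i+1) (kk - 1) = some J := by
          rw [kth_set_lt fs i (i+1) (kk-1) _ (by omega)]
          exact hkth
        have hlen : (fs.set i (fs[i] - 1)).length = fs.length := by simp
        obtain ⟨F, hF1, hF2⟩ := ih (fs.length - (i+1)) (by omega) (i+1) (fs.set i (fs[i] - 1))
          (kk - 1) J f (by rw [hlen]) (by omega) hkth'
        rw [hlen] at hF1
        rw [show ((kk - 1 : Nat) : Int) = (kk : Int) - 1 by omega] at hF1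
        refine ⟨F, hF1, ?_⟩
        intro p
        rw [hF2 p, List.getElem?_set]
        rcases Nat.lt_trichotomy p i with hp | hp | hp
        · rw [if_neg (by omega : ¬ (i + 1 ≤ p ∧ p ≤ J)), if_neg (by omega : ¬ i = p),
            if_neg (by omega)]
        · subst hp
          rw [if_neg (by omega : ¬ (p + 1 ≤ p ∧ p ≤ J)), if_pos rfl, if_pos hii,
            if_pos (by omega : p ≤ p ∧ p ≤ J)]
          rw [List.getElem?_eq_getElem hii]
          simp [dec1, h0]
        · rw [if_neg (by omega : ¬ i = p)]
          by_cases hpJ : p ≤ J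
          · rw [if_pos (by omega), if_pos (by omega)]
          · rw [if_neg (by omega), if_neg (by omega)]

-- ---------- pyLoop2 ----------

lemma pyLoop2_step (c : Nat) (fs : List Int) (i : Nat) (hi : i < fs.length) :
    pyLoop2 fs i (c + 1) = if fs[i] ≠ 0 then (i : Int) + 1 else pyLoop2 fs (i + 1) c := by
  rw [pyLoop2]
  simp only [if_neg (Nat.not_le.mpr hi)]
  rw [List.getElem?_eq_getElem hi]

lemma pyLoop2_wrap (c : Nat) (fs : List Int) : pyLoop2 fs fs.length c = pyLoop2 fs 0 c := by
  cases c with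
  | zero => rfl
  | succ c =>
    conv_lhs => rw [pyLoop2]
    conv_rhs => rw [pyLoop2]
    simp only [le_refl, if_true, Nat.mod_self]
    by_cases h0 : fs.length = 0
    · simp [h0]
    · rw [if_neg (by omega)]

lemma pyLoop2_find (c start P : Nat) (fs : List Int) (h1 : start ≤ P) (h2 : P < fs.length)
    (h3 : fs.getD P 0 ≠ 0) (h4 : ∀ p, start ≤ p → p < P → fs.getD p 0 = 0) (h5 : P - start < c) :
    pyLoop2 fs start c = (P : Int) + 1 := by
  induction c generalizing start with
  | zero => omega
  | succ c ih =>
    have hs : start < fs.length := by omega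
    rw [pyLoop2_step c fs start hs]
    by_cases hsp : start = P
    · subst hsp
      rw [if_pos (by rw [List.getD_eq_getElem?_getD, List.getElem?_eq_getElem hs] at h3; simpa using h3)]
    · have hz : fs[start] = 0 := by
        have := h4 start (le_refl _) (by omega)
        rw [List.getD_eq_getElem?_getD, List.getElem?_eq_getElem hs] at this
        simpa using this
      rw [if_neg (by simpa using hz)]
      exact ih (start + 1) (by omega) (fun p hp1 hp2 => h4 p (by omega) hp2) (by omega)

lemma pyLoop2_allzero_seg (c start : Nat) (fs : List Int) (h1 : start ≤ fs.length)
    (h4 : ∀ p, start ≤ p → p < fs.length → fs.getD p 0 = 0) :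
    pyLoop2 fs start ((fs.length - start) + c) = pyLoop2 fs fs.length c := by
  induction hd : fs.length - start using Nat.strong_induction_on generalizing start with
  | _ d ih =>
    subst hd
    by_cases hs : start < fs.length
    · have hz : fs[start] = 0 := by
        have := h4 start (le_refl _) hs
        rw [List.getD_eq_getElem?_getD, List.getElem?_eq_getElem hs] at this
        simpa using this
      rw [show fs.length - start + c = ((fs.length - (start+1)) + c) + 1 by omega,
        pyLoop2_step _ fs start hs, if_neg (by simpa using hz)]
      exact ih (fs.length - (start+1)) (by omega) (start+1) (by omega)
        (fun p hp1 hp2 => h4 p (by omega) hp2) rfl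
    · have : start = fs.length := by omega
      subst this
      norm_num

lemma pyLoop2_none (fs : List Int) (h : nzCnt fs 0 = 0) : ∀ (c start : Nat), pyLoop2 fs start c = -1 := by
  intro c
  induction c with
  | zero => intro start; rfl
  | succ c ih =>
    intro start
    rw [pyLoop2]
    by_cases h0 : fs.length = 0
    · rw [List.length_eq_zero_iff] at h0
      subst h0
      simp
    · have hlt : (if fs.length ≤ start then start % fs.length else start) < fs.length := by
        split
        · exact Nat.mod_lt _ (by omega)
        · omega
      rw [List.getElem?_eq_getElem hlt]
      have hz := nzCnt_zero_tail fs 0 h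
        (if fs.length ≤ start then start % fs.length else start) (Nat.zero_le _)
      rw [List.getD_eq_getElem?_getD, List.getElem?_eq_getElem hlt] at hz
      simp only [Option.getD_some] at hz
      simp only [hz, ne_eq, not_true_eq_false, if_false]
      exact ih _

-- ---------- the jump performed by B ----------

lemma bJump_one (fs : List Int) : bJump fs 1 = fs.map dec1 := by
  unfold bJump dec1
  apply List.map_congr_left
  intro v _
  by_cases h : v = 0 <;> simp [h]

lemma bJump_add (fs : List Int) (a b : Int) (h0 : 0 ≤ a) (h : ∀ v ∈ fs, 0 < v → a < v) :
    bJump (bJump fs a) b = bJump fs (a + b) := by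
  unfold bJump
  rw [List.map_map]
  apply List.map_congr_left
  intro v hv
  by_cases hz : v = 0
  · simp [hz]
  · have hna : v - a ≠ 0 := by
      by_cases hp : 0 < v
      · have := h v hv hp; omega
      · omega
    simp [hz, hna]
    ring

lemma bCount_bJump (fs : List Int) (a : Int) (h0 : 0 ≤ a) (h : ∀ v ∈ fs, 0 < v → a < v) :
    bCount (bJump fs a) = bCount fs := by
  unfold bCount bJump
  rw [List.filter_map, List.length_map]
  congr 1
  apply List.filter_congr
  intro v hv
  simp only [Function.comp_apply]
  by_cases hz : v = 0
  · simp [hz]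
  · have hna : v - a ≠ 0 := by
      by_cases hp : 0 < v
      · have := h v hv hp; omega
      · omega
    rw [if_neg (by simpa using hz)]
    rw [show (v - a != 0) = true by simpa using hna, show (v != 0) = true by simpa using hz]

lemma sum_bJump (fs : List Int) (a : Int) :
    (bJump fs a).sum = fs.sum - a * (bCount fs : Int) := by
  induction fs with
  | nil => simp [bJump, bCount]
  | cons v t ih =>
    simp only [bJump, List.map_cons, List.sum_cons, bCount, List.filter_cons] at ih ⊢
    by_cases hz : v = 0
    · simp only [hz, BEq.rfl, if_true, if_neg (by simp : ¬ ((0:Int) != 0) = true)]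
      rw [ih]
      ring
    · rw [if_neg (by simpa using hz), if_pos (by simpa using hz)]
      rw [ih, List.length_cons]
      push_cast
      ring

lemma bCount_zero_all (fs : List Int) (h : bCount fs = 0) : ∀ v ∈ fs, v = 0 := by
  unfold bCount at h
  rw [List.length_eq_zero_iff, List.filter_eq_nil_iff] at h
  intro v hv
  have := h v hv
  simpa using this

-- q full rounds at once (q ≤ every remaining positive time, q * m < k):
-- the A-loop comes back to an aligned state with every nonzero entry lowered by q
lemma bJump_zero (fs : List Int) : bJump fs 0 = fs := by
  unfold bJump
  have : ∀ v ∈ fs, (if v == 0 then v else v - 0) = v := by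
    intro v _
    by_cases h : v = 0 <;> simp [h]
  rw [List.map_congr_left this]
  simp

lemma length_bJump (fs : List Int) (a : Int) : (bJump fs a).length = fs.length := by
  simp [bJump]

lemma L_rounds (q : Nat) : ∀ (fs : List Int) (k : Int) (f : Nat),
    (∀ v ∈ fs, 0 < v → (q : Int) ≤ v) → ((q : Int) * (bCount fs : Int) < k) →
    pyLoop1 (q * fs.length + f) fs k 0 = pyLoop1 f (bJump fs (q : Int)) (k - (q : Int) * (bCount fs : Int)) 0 := by
  induction q with
  | zero =>
    intro fs k f _ _
    push_cast
    rw [bJump_zero]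
    norm_num
  | succ q ih =>
    intro fs k f hpos hk
    have hm0 : (0:Int) ≤ (bCount fs : Int) := by positivity
    have hq0 : (0:Int) ≤ (q : Int) := by positivity
    have hqm0 : (0:Int) ≤ (q : Int) * (bCount fs : Int) := by positivity
    have hmk : (bCount fs : Int) < k := by push_cast at hk; nlinarith
    have hka : (nzCnt fs 0 : Int) < k := by rw [← bCount_eq_nzCnt]; exact hmk
    have hrd := seg_a (fs.length) 0 fs k (q * fs.length + f) (by omega) (by omega) hka
    rw [show (q+1) * fs.length + f = (fs.length - 0) + (q * fs.length + f) by
      rw [Nat.succ_mul]; omega, hrd]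
    rw [List.take_zero, List.drop_zero, List.nil_append, ← bJump_one, ← bCount_eq_nzCnt]
    have hkm0 : k - (bCount fs : Int) ≠ 0 := by push_cast at hk; nlinarith
    rw [show fs.length = (bJump fs 1).length by rw [length_bJump]]
    rw [pyLoop1_wrap _ _ _ hkm0]
    rcases Nat.eq_zero_or_pos q with hq | hq
    · subst hq
      push_cast
      norm_num
    · have hgt : ∀ v ∈ fs, 0 < v → (1:Int) < v := by
        intro v hv hp
        have := hpos v hv hp
        push_cast at this
        omega
      have hcnt1 : bCount (bJump fs 1) = bCount fs := bCount_bJump fs 1 (by norm_num) hgt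
      have hpos' : ∀ v ∈ bJump fs 1, 0 < v → (q : Int) ≤ v := by
        intro v hv hvp
        obtain ⟨u, hu, rfl⟩ := List.mem_map.mp hv
        by_cases hz : u = 0
        · simp [hz] at hvp
        · simp only [if_neg (by simpa using hz)] at hvp ⊢
          have := hpos u hu (by omega)
          push_cast at this
          omega
      have hk' : (q : Int) * (bCount (bJump fs 1) : Int) < k - (bCount fs : Int) := by
        rw [hcnt1]
        push_cast at hk
        nlinarith
      have hrec := ih (bJump fs 1) (k - (bCount fs : Int)) f hpos' hk'
      rw [hrec, hcnt1, bJump_add fs 1 (q : Int) (by norm_num) hgt]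
      rw [show (1 + (q:Int)) = ((q+1 : Nat) : Int) by push_cast; ring]
      rw [show k - (bCount fs : Int) - (q:Int) * (bCount fs : Int)
          = k - ((q+1 : Nat) : Int) * (bCount fs : Int) by push_cast; ring]
-- ---------- main correspondence ----------

-- facts about bQ and bRun's fuel
lemma bQ_ge_one (fs : List Int) (k m : Int) (hm : 1 ≤ m) (_hk : m ≤ k) : 1 ≤ bQ fs k m := by
  have hfd1 : (1:Int) ≤ PySem.Int.floordiv k m :=
    (PySem.Int.le_floordiv_iff_mul_le (by omega)).mpr (by omega)
  unfold bQ
  cases hpos : PySem.List.min? (fs.filter (fun v => decide (0 < v))) (fun x => x) with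
  | none => exact hfd1
  | some t =>
    have ht : t ∈ fs.filter (fun v => decide (0 < v)) := PySem.List.min?_mem hpos
    have ht1 : (1:Int) ≤ t := by
      have := (List.mem_filter.mp ht).2
      simp at this; omega
    exact le_min ht1 hfd1

lemma bQ_mul_le (fs : List Int) (k m : Int) (hm : 1 ≤ m) (hk : m ≤ k) : bQ fs k m * m ≤ k := by
  have hfdm : PySem.Int.floordiv k m * m ≤ k := by
    have h := PySem.Int.floordiv_mul_add_mod k m
    have h2 := PySem.Int.mod_nonneg (a := k) (b := m) (by omega)
    linarith
  have hle : bQ fs k m ≤ PySem.Int.floordiv k m := by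
    unfold bQ
    cases PySem.List.min? (fs.filter (fun v => decide (0 < v))) (fun x => x) with
    | none => exact le_refl _
    | some t => exact min_le_right _ _
  exact le_trans (mul_le_mul_of_nonneg_right hle (by omega)) hfdm

lemma bRun_dec (fs : List Int) (k : Int) (hm : ¬ (bCount fs : Int) = 0) (hk : ¬ k < (bCount fs : Int)) :
    (k - bQ fs k (bCount fs : Int) * (bCount fs : Int)).toNat < k.toNat := by
  have hm1 : (1:Int) ≤ (bCount fs : Int) := by
    have : bCount fs ≠ 0 := by exact_mod_cast hm
    exact_mod_cast Nat.pos_of_ne_zero this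
  have hk' : (bCount fs : Int) ≤ k := le_of_not_gt hk
  have h1 := bQ_ge_one fs k _ hm1 hk'
  have h2 := bQ_mul_le fs k _ hm1 hk'
  have h3 : 1 * (bCount fs : Int) ≤ bQ fs k (bCount fs : Int) * (bCount fs : Int) :=
    mul_le_mul_of_nonneg_right h1 (by omega)
  omega

-- the fuel k.toNat + 1 given to bRun is sufficient: each pass consumes at least one unit of k
lemma bRun_fuel (fuel fuel' : Nat) (fs : List Int) (k : Int)
    (h : k.toNat < fuel) (h' : k.toNat < fuel') : bRun fuel fs k = bRun fuel' fs k := by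
  induction fuel using Nat.strong_induction_on generalizing fuel' fs k with
  | _ fuel ihf =>
    match fuel, fuel' with
    | fl+1, fl'+1 =>
      rw [bRun, bRun]
      split
      · rfl
      · split
        · rfl
        · rename_i hm hk
          exact ihf fl (by omega) _ _ _ (by have := bRun_dec fs k hm hk; omega)
            (by have := bRun_dec fs k hm hk; omega)

lemma bQ_le_pos (fs : List Int) (k m v : Int) (hv : v ∈ fs) (hp : 0 < v) : bQ fs k m ≤ v := by
  have hvp : v ∈ fs.filter (fun v => decide (0 < v)) := List.mem_filter.mpr ⟨hv, by simpa using hp⟩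
  unfold bQ
  cases hmin : PySem.List.min? (fs.filter (fun v => decide (0 < v))) (fun x => x) with
  | none =>
    rw [PySem.List.min?_eq_none_iff] at hmin
    rw [hmin] at hvp
    cases hvp
  | some t =>
    have := PySem.List.min?_isMin hmin v hvp
    exact le_trans (min_le_left _ _) this

lemma main_corr (K : Nat) : ∀ (fs : List Int) (k : Int) (f : Nat),
    k.toNat = K → 0 < fs.length → 0 ≤ k → ((∀ x ∈ fs, 0 ≤ x) → k ≤ fs.sum) →
    ∃ F I, pyLoop1 (k.toNat * (fs.length + 1) + fs.length + 2 + f) fs k 0 = some (F, I) ∧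
      pyLoop2 F I (fs.length + 1) = solution_alt fs k := by
  induction K using Nat.strong_induction_on with
  | _ K ih =>
    intro fs k f hK hn hk0 hcap
    by_cases hkz : k = 0
    · subst hkz
      refine ⟨fs, 0, ?_, ?_⟩
      · rw [show Int.toNat 0 * (fs.length + 1) + fs.length + 2 + f = (fs.length + 1 + f) + 1 by norm_num; omega]
        exact pyLoop1_done _ _ _
      · rw [solution_alt, show Int.toNat 0 + 1 = 0 + 1 by omega, bRun]
        by_cases hm : bCount fs = 0
        · rw [if_pos (by exact_mod_cast hm)]
          exact pyLoop2_none fs (by rw [← bCount_eq_nzCnt]; exact hm) _ _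
        · rw [if_neg (by exact_mod_cast hm), if_pos (by exact_mod_cast Nat.pos_of_ne_zero hm)]
          obtain ⟨P, hP⟩ := kth_isSome fs 0 1 (le_refl _) (by rw [← bCount_eq_nzCnt]; omega)
          have hPs := kth_sound fs 0 1 P hP
          rw [PySem.List.pyGet?_zero, bRem_get fs 0, show 0 + 1 = 1 by rfl, hP]
          rw [pyLoop2_find (fs.length + 1) 0 P fs (by omega) (by omega) (by tauto)
            (fun p hp1 hp2 => kth_one_zeros fs 0 P hP p hp1 hp2) (by omega)]
          rfl
    · have hkpos : 0 < k := by omega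
      have hm1 : 1 ≤ bCount fs := by
        rcases Nat.eq_zero_or_pos (bCount fs) with h0 | h1
        · exfalso
          have hall := bCount_zero_all fs h0
          have := hcap (fun x hx => by rw [hall x hx])
          rw [List.sum_eq_zero hall] at this
          omega
        · exact h1
      by_cases hklt : k < (bCount fs : Int)
      · -- fewer seconds than remaining dishes: A stops inside this round
        have hkk1 : 1 ≤ k.toNat := by omega
        have hkkm : k.toNat < bCount fs := by omega
        obtain ⟨J, hJ⟩ := kth_isSome fs 0 k.toNat hkk1 (by rw [← bCount_eq_nzCnt]; omega)
        have hJs := kth_sound fs 0 k.toNat J hJ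
        obtain ⟨F, hF1, hF2⟩ := seg_b fs.length 0 fs k.toNat J
          (k.toNat * fs.length + k.toNat + 1 + f) rfl hkk1 hJ
        rw [show (fs.length - 0) + 1 + (k.toNat * fs.length + k.toNat + 1 + f)
            = k.toNat * (fs.length + 1) + fs.length + 2 + f by
          rw [Nat.mul_add, Nat.mul_one]; omega] at hF1
        rw [Int.toNat_of_nonneg hk0] at hF1
        have hlenF : F.length = fs.length := pyLoop1_length _ _ _ _ _ _ hF1
        refine ⟨F, J + 1, hF1, ?_⟩
        -- the next dish A will report: the (k+1)-st nonzero entry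
        obtain ⟨P, hP⟩ := kth_isSome fs 0 (k.toNat + 1) (by omega) (by rw [← bCount_eq_nzCnt]; omega)
        have hPnext : kth fs (J + 1) 1 = some P := by rw [← kth_succ fs 0 k.toNat J hkk1 hJ]; exact hP
        have hPs := kth_sound fs (J+1) 1 P hPnext
        have hgetF : ∀ p, J < p → F.getD p 0 = fs.getD p 0 := by
          intro p hp
          rw [List.getD_eq_getElem?_getD, List.getD_eq_getElem?_getD, hF2 p,
            if_neg (by omega)]
        rw [pyLoop2_find (fs.length + 1) (J+1) P F (by omega) (by rw [hlenF]; omega)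
          (by rw [hgetF P (by omega)]; tauto)
          (fun p hp1 hp2 => by
            rw [hgetF p (by omega)]
            exact kth_one_zeros fs (J+1) P hPnext p hp1 hp2)
          (by omega)]
        -- B returns the same entry
        rw [solution_alt, show k.toNat + 1 = k.toNat + 1 by rfl, bRun]
        rw [if_neg (by exact_mod_cast (by omega : ¬ bCount fs = 0)), if_pos hklt]
        rw [PySem.List.pyGet?_of_nonneg _ hk0, bRem_get fs k.toNat, hP]
        rfl
      · -- at least one full round: jump q rounds at once, like B does
        have hmle : (bCount fs : Int) ≤ k := le_of_not_gt hklt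
        have hm1' : (1:Int) ≤ (bCount fs : Int) := by exact_mod_cast hm1
        set q := bQ fs k (bCount fs : Int) with hqdef
        have hq1 : 1 ≤ q := bQ_ge_one fs k _ hm1' hmle
        have hqm : q * (bCount fs : Int) ≤ k := bQ_mul_le fs k _ hm1' hmle
        have hqv : ∀ v ∈ fs, 0 < v → q ≤ v := fun v hv hp => bQ_le_pos fs k _ v hv hp
        have hq0 : (0:Int) ≤ q := by omega
        have hqq : ((q.toNat : Nat) : Int) = q := Int.toNat_of_nonneg hq0
        have hqm1 : (1:Int) ≤ q * (bCount fs : Int) := by nlinarith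
        have hBstep : solution_alt fs k
            = bRun k.toNat (bJump fs q) (k - q * (bCount fs : Int)) := by
          rw [solution_alt, bRun,
            if_neg (by exact_mod_cast (by omega : ¬ bCount fs = 0)), if_neg hklt]
        have hqmN : ((q.toNat * bCount fs : Nat) : Int) = q * (bCount fs : Int) := by
          push_cast
          rw [hqq]
        by_cases hlt : q * (bCount fs : Int) < k
        · -- strictly more seconds than the jump consumes: recurse on the smaller state
          have hk'0 : (0:Int) ≤ k - q * (bCount fs : Int) := by omega
          have hsplit : k.toNat = (k - q * (bCount fs : Int)).toNat + q.toNat * bCount fs := by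
            omega
          have hδle : q.toNat * fs.length ≤ q.toNat * bCount fs * (fs.length + 1) := by
            calc q.toNat * fs.length ≤ q.toNat * (fs.length + 1) :=
                  Nat.mul_le_mul_left _ (by omega)
            _ ≤ q.toNat * bCount fs * (fs.length + 1) :=
                  Nat.mul_le_mul_right _ (Nat.le_mul_of_pos_right _ (by omega))
          have hcap' : (∀ x ∈ bJump fs q, 0 ≤ x) → k - q * (bCount fs : Int) ≤ (bJump fs q).sum := by
            intro hall
            have hallfs : ∀ x ∈ fs, 0 ≤ x := by
              intro u hu
              by_cases hz : u = 0
              · omega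
              · have hmem : (if u == 0 then u else u - q) ∈ bJump fs q := List.mem_map_of_mem hu
                rw [if_neg (by simpa using hz)] at hmem
                have := hall _ hmem
                omega
            have := hcap hallfs
            rw [sum_bJump]
            linarith
          obtain ⟨F, I, hF, hP2⟩ := ih (k - q * (bCount fs : Int)).toNat (by omega)
            (bJump fs q) (k - q * (bCount fs : Int))
            (f + (q.toNat * bCount fs * (fs.length + 1) - q.toNat * fs.length)) rfl
            (by rw [length_bJump]; omega) hk'0 hcap'
          rw [length_bJump] at hF hP2
          refine ⟨F, I, ?_, ?_⟩
          · rw [show k.toNat * (fs.length + 1) + fs.length + 2 + f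
                = q.toNat * fs.length + ((k - q * (bCount fs : Int)).toNat * (fs.length + 1)
                  + fs.length + 2
                  + (f + (q.toNat * bCount fs * (fs.length + 1) - q.toNat * fs.length))) by
              rw [hsplit, Nat.add_mul]
              omega]
            rw [L_rounds q.toNat fs k _ (by rw [hqq]; exact hqv) (by rw [hqq]; exact hlt), hqq]
            exact hF
          · rw [hP2, hBstep, solution_alt]
            exact (bRun_fuel _ _ _ _ (by omega) (by omega)).symm
        · -- the k seconds are consumed exactly: the answer is read off the final configuration
          have heq : q * (bCount fs : Int) = k := by omega
          have hs1 : 1 ≤ q.toNat := by omega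
          have hsq : ((q.toNat - 1 : Nat) : Int) = q - 1 := by push_cast [hs1]; omega
          have hsv : ∀ v ∈ fs, 0 < v → ((q.toNat - 1 : Nat) : Int) ≤ v := by
            intro v hv hp
            have := hqv v hv hp
            omega
          have hslt : ∀ v ∈ fs, 0 < v → ((q.toNat - 1 : Nat) : Int) < v := by
            intro v hv hp
            have := hqv v hv hp
            omega
          have hcnt1 : bCount (bJump fs ((q.toNat - 1 : Nat) : Int)) = bCount fs :=
            bCount_bJump fs _ (by omega) hslt
          have hsk : ((q.toNat - 1 : Nat) : Int) * (bCount fs : Int) < k := by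
            rw [hsq]
            nlinarith
          have hk1 : k - ((q.toNat - 1 : Nat) : Int) * (bCount fs : Int) = (bCount fs : Int) := by
            rw [hsq]
            nlinarith [heq]
          -- the final round, eaten entry by entry
          obtain ⟨J, hJ⟩ := kth_isSome (bJump fs ((q.toNat - 1 : Nat) : Int)) 0 (bCount fs) hm1
            (by rw [← bCount_eq_nzCnt, hcnt1])
          have hJs := kth_sound _ 0 (bCount fs) J hJ
          have hJn : J < fs.length := by
            have := hJs.2.1
            rwa [length_bJump] at this
          have hken : q.toNat ≤ k.toNat := by
            have h1 : q * 1 ≤ q * (bCount fs : Int) := by nlinarith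
            omega
          have hfuel : (q.toNat - 1) * fs.length + fs.length + 1
              ≤ k.toNat * (fs.length + 1) + fs.length + 2 + f := by
            have h2 : ((q.toNat - 1) + 1) * (fs.length + 1) ≤ k.toNat * (fs.length + 1) :=
              Nat.mul_le_mul_right _ (by omega)
            have h3 : ((q.toNat - 1) + 1) * (fs.length + 1)
                = (q.toNat - 1) * fs.length + (q.toNat - 1) + fs.length + 1 := by ring
            omega
          obtain ⟨F, hF1, hF2⟩ := seg_b (bJump fs ((q.toNat - 1 : Nat) : Int)).length 0
            (bJump fs ((q.toNat - 1 : Nat) : Int)) (bCount fs) J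
            (k.toNat * (fs.length + 1) + fs.length + 2 + f
              - ((q.toNat - 1) * fs.length + fs.length + 1)) rfl hm1 hJ
          have hlenF : F.length = fs.length := by
            have := pyLoop1_length _ _ _ _ _ _ hF1
            rwa [length_bJump] at this
          refine ⟨F, J + 1, ?_, ?_⟩
          · rw [show k.toNat * (fs.length + 1) + fs.length + 2 + f
                = (q.toNat - 1) * fs.length
                  + ((bJump fs ((q.toNat - 1 : Nat) : Int)).length - 0 + 1
                    + (k.toNat * (fs.length + 1) + fs.length + 2 + f
                      - ((q.toNat - 1) * fs.length + fs.length + 1))) by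
              rw [length_bJump]
              omega]
            rw [L_rounds (q.toNat - 1) fs k _ hsv hsk, hk1]
            exact hF1
          · -- after the exact jump the list equals B's jumped list
            have hlast : ∀ p, J < p → (bJump fs ((q.toNat - 1 : Nat) : Int)).getD p 0 = 0 := by
              have hc := kth_count _ 0 (bCount fs) J hm1 hJ
              rw [← bCount_eq_nzCnt, hcnt1] at hc
              exact nzCnt_zero_tail _ (J+1) (by omega)
            have hFeq : F = bJump fs q := by
              have hstep1 : bJump (bJump fs ((q.toNat - 1 : Nat) : Int)) 1 = bJump fs q := by
                rw [bJump_add fs _ 1 (by omega) hslt, show ((q.toNat - 1 : Nat) : Int) + 1 = q by omega]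
              rw [← hstep1, bJump_one]
              apply List.ext_getElem?
              intro p
              rw [hF2 p, List.getElem?_map]
              by_cases hpJ : p ≤ J
              · rw [if_pos ⟨Nat.zero_le _, hpJ⟩]
              · rw [if_neg (by omega)]
                by_cases hpn : p < (bJump fs ((q.toNat - 1 : Nat) : Int)).length
                · have hz := hlast p (by omega)
                  rw [List.getD_eq_getElem?_getD, List.getElem?_eq_getElem hpn] at hz
                  simp only [Option.getD_some] at hz
                  rw [List.getElem?_eq_getElem hpn, hz]
                  simp [dec1]
                · rw [List.getElem?_eq_none (by omega)]
                  rfl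
            have hFz : ∀ p, J < p → F.getD p 0 = 0 := by
              intro p hp
              by_cases hpn : p < F.length
              · rw [List.getD_eq_getElem?_getD, hF2 p, if_neg (by omega)]
                have := hlast p hp
                rw [List.getD_eq_getElem?_getD] at this
                exact this
              · rw [List.getD_eq_getElem?_getD, List.getElem?_eq_none (by omega)]
                rfl
            rw [hBstep, heq]
            norm_num
            rw [← hFeq]
            obtain ⟨j, hj⟩ : ∃ j, k.toNat = j + 1 := ⟨k.toNat - 1, by omega⟩
            rw [hj, bRun]
            by_cases hc0 : bCount F = 0
            · rw [if_pos (by exact_mod_cast hc0)]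
              exact pyLoop2_none F (by rw [← bCount_eq_nzCnt]; exact hc0) _ _
            · rw [if_neg (by exact_mod_cast hc0),
                if_pos (by exact_mod_cast Nat.pos_of_ne_zero hc0)]
              obtain ⟨P, hP⟩ := kth_isSome F 0 1 (le_refl _)
                (by rw [← bCount_eq_nzCnt]; omega)
              have hPs := kth_sound F 0 1 P hP
              have hPJ : P ≤ J := by
                by_contra hcon
                have := hFz P (by omega)
                tauto
              rw [PySem.List.pyGet?_zero, bRem_get F 0, show 0 + 1 = 1 by rfl, hP]
              rw [show fs.length + 1 = (F.length - (J + 1)) + (J + 2) by omega]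
              rw [pyLoop2_allzero_seg _ _ F (by omega)
                (fun p hp1 hp2 => hFz p (by omega))]
              rw [pyLoop2_wrap]
              rw [pyLoop2_find (J + 2) 0 P F (by omega) (by omega) (by tauto)
                (fun p hp1 hp2 => kth_one_zeros F 0 P hP p hp1 hp2) (by omega)]
              rfl


-- ===== VERDICT (by name: the statement is the Claim_ definition above) =====
theorem solution_spec : Claim_equal_solution := by
  intro fs k _hdom hpre
  obtain ⟨hne, hk0, hcap⟩ := hpre
  have hn : 0 < fs.length := List.length_pos_iff.mpr hne
  obtain ⟨F, I, hF, hP2⟩ := main_corr k.toNat fs k k.toNat rfl hn hk0 hcap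
  show solution fs k = solution_alt fs k
  rw [solution, show (k.toNat + 1) * (fs.length + 2)
      = k.toNat * (fs.length + 1) + fs.length + 2 + k.toNat by ring, hF]
  show pyLoop2 F I (F.length + 1) = solution_alt fs k
  rw [pyLoop1_length _ _ _ _ _ _ hF]
  exact hP2
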